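-- pv_equiv track=rewrite | github.com/nonaninona/INTRODUCTORY-COMPUTER-ENGINEERING-PROJECT-1 | reserve.py | sort_schedule
-- ===== SOURCE A (Python) =====
-- def sort_schedule(schedule_list, date_time):
--     schedule_list = sorted(schedule_list, key=lambda x: x[3] + x[4])
--     idx = -1
--     length = len(schedule_list)
--     date = date_time.split(' ')[0]
--     time = date_time.split(' ')[1]
--
--     for i in range(length):
--         date1 = schedule_list[i][3]
--         time1 = schedule_list[i][4]
--         if date + time < date1 + time1:
--             idx = i
--             break
--
--     if idx == -1:
--         return []
--     else:
--         schedule_list = schedule_list[idx:length]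
--         schedule_list = sorted(schedule_list, key=lambda x: x[0])
--         return schedule_list
-- ===== SOURCE B (Python) =====
-- def sort_schedule(schedule_list, date_time):
--     date = date_time.split(' ')[0]
--     time = date_time.split(' ')[1]
--     cutoff = date + time
--     kept = [x for x in schedule_list if cutoff < x[3] + x[4]]
--     return sorted(kept, key=lambda x: (x[0], x[3] + x[4]))
-- ===== Notes on version B (the rewrite author's own statement) =====
-- stated objective: simpler
-- what changed: A sorts the whole list by date+time, linearly scans indices for the first entry past the cutoff, slices, and sorts again by id; B does one filter pass keeping entries past the cutoff and a single sort with the composite key (id, date+time), which reproduces A's stable two-phase ordering.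
import Mathlib
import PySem

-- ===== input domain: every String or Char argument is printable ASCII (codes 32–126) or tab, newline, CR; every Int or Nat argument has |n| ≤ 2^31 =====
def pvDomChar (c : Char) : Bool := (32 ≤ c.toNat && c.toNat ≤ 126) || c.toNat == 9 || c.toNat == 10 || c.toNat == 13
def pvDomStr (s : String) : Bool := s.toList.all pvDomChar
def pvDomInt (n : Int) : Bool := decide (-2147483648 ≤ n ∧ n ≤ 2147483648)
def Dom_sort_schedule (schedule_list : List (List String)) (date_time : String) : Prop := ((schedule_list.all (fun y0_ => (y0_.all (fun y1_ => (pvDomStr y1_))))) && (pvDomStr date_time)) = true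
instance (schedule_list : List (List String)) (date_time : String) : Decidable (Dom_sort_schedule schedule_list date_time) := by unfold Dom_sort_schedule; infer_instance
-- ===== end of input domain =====

-- B replaces A's sort–linear-scan–slice–sort pipeline by a single filter pass followed by one
-- sort with a composite key (objective: simpler, one sort instead of two plus a scan).

-- ===== PORT A =====
-- the 'for i in range(length): … break' loop; idx accumulator starts at -1;
-- pyGetD with default "" / [] totalizes x[i] (Python raises IndexError there; excluded by Pre_)
def sortScheduleLoop (sl : List (List String)) (date time : String) : List Int → Int → Int
  | [], idx => idx
  | i :: rest, idx =>
    let date1 := PySem.List.pyGetD (PySem.List.pyGetD sl i []) 3 ""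
    let time1 := PySem.List.pyGetD (PySem.List.pyGetD sl i []) 4 ""
    if date ++ time < date1 ++ time1 then i
    else sortScheduleLoop sl date time rest idx

def sort_schedule (schedule_list : List (List String)) (date_time : String) : List (List String) :=
  let sl := PySem.List.sorted schedule_list (fun x => PySem.List.pyGetD x 3 "" ++ PySem.List.pyGetD x 4 "")
  let length : Int := sl.length
  let date := PySem.List.pyGetD ((PySem.Str.split? date_time " ").getD []) 0 ""
  let time := PySem.List.pyGetD ((PySem.Str.split? date_time " ").getD []) 1 ""
  let idx := sortScheduleLoop sl date time (PySem.List.pyRange 0 length) (-1)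
  if idx = -1 then []
  else PySem.List.sorted (PySem.List.slice sl (some idx) (some length)) (fun x => PySem.List.pyGetD x 0 "")

-- ===== PORT B =====
def sort_schedule_alt (schedule_list : List (List String)) (date_time : String) : List (List String) :=
  let date := PySem.List.pyGetD ((PySem.Str.split? date_time " ").getD []) 0 ""
  let time := PySem.List.pyGetD ((PySem.Str.split? date_time " ").getD []) 1 ""
  let cutoff := date ++ time
  let kept := schedule_list.filter (fun x => decide (cutoff < PySem.List.pyGetD x 3 "" ++ PySem.List.pyGetD x 4 ""))
  PySem.List.sorted2 kept (fun x => PySem.List.pyGetD x 0 "") (fun x => PySem.List.pyGetD x 3 "" ++ PySem.List.pyGetD x 4 "")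

-- ===== PRECONDITION & SPEC =====
-- Pre_ excludes exactly the inputs where Python A raises IndexError: a date_time without a space
-- (split(' ')[1] fails) or a row shorter than 5 (x[3]/x[4]/x[0] fail).
def Pre_sort_schedule (schedule_list : List (List String)) (date_time : String) : Prop :=
  (' ' ∈ date_time.toList) ∧ ∀ row ∈ schedule_list, 5 ≤ row.length

instance (schedule_list : List (List String)) (date_time : String) : Decidable (Pre_sort_schedule schedule_list date_time) := by unfold Pre_sort_schedule; infer_instance

def pvWitness_sort_schedule : List (List String) × String :=
  ([["r1", "alice", "gym", "2024-01-02", "10:00"], ["r2", "bob", "pool", "2024-01-01", "09:00"]], "2023-12-31 08:00")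

def Spec_sort_schedule (schedule_list : List (List String)) (date_time : String) (out : List (List String)) : Prop := out = sort_schedule_alt schedule_list date_time
instance (schedule_list : List (List String)) (date_time : String) (out : List (List String)) : Decidable (Spec_sort_schedule schedule_list date_time out) := by unfold Spec_sort_schedule; infer_instance

-- ===== CLAIM (what is proved, stated in full; the proofs are below) =====
def Claim_equal_sort_schedule : Prop := ∀ (schedule_list : List (List String)) (date_time : String), Dom_sort_schedule schedule_list date_time → Pre_sort_schedule schedule_list date_time → Spec_sort_schedule schedule_list date_time (sort_schedule schedule_list date_time)

-- ===== LEMMAS AND PROOFS =====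

-- proof-local names for the two sort keys and the split components (definitionally the ports' lambdas)
def pvK1 (x : List String) : String := PySem.List.pyGetD x 3 "" ++ PySem.List.pyGetD x 4 ""
def pvK0 (x : List String) : String := PySem.List.pyGetD x 0 ""
def pvDate (date_time : String) : String := PySem.List.pyGetD ((PySem.Str.split? date_time " ").getD []) 0 ""
def pvTime (date_time : String) : String := PySem.List.pyGetD ((PySem.Str.split? date_time " ").getD []) 1 ""

-- insertBy only looks at 'before x ·' on the members of ys
theorem insertBy_congr {α : Type} (f g : α → α → Bool) (x : α) (ys : List α)
    (h : ∀ y ∈ ys, f x y = g x y) :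
    PySem.List.insertBy f x ys = PySem.List.insertBy g x ys := by
  induction ys with
  | nil => rfl
  | cons y ys ih =>
    have hy := h y (by simp)
    by_cases hg : g x y = true
    · simp [PySem.List.insertBy, hy, hg]
    · simp only [Bool.not_eq_true] at hg
      simp [PySem.List.insertBy, hy, hg, ih (fun z hz => h z (by simp [hz]))]

-- x goes to the front when it is before every element
theorem insertBy_eq_cons_of_forall {α : Type} (f : α → α → Bool) (x : α) (ys : List α)
    (h : ∀ y ∈ ys, f x y = true) :
    PySem.List.insertBy f x ys = x :: ys := by
  cases ys with
  | nil => rfl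
  | cons y ys => simp [PySem.List.insertBy, h y (by simp)]

-- insertion into a key-sorted list keeps it key-sorted
theorem insertBy_pairwise {α κ : Type} [LinearOrder κ] (k : α → κ) (x : α) (ys : List α)
    (h : ys.Pairwise (fun a b => k a ≤ k b)) :
    (PySem.List.insertBy (fun a b => decide (k a < k b)) x ys).Pairwise (fun a b => k a ≤ k b) := by
  induction ys with
  | nil => simp [PySem.List.insertBy]
  | cons y ys ih =>
    rcases List.pairwise_cons.1 h with ⟨hy, ht⟩
    by_cases hlt : k x < k y
    · rw [show PySem.List.insertBy (fun a b => decide (k a < k b)) x (y :: ys) = x :: y :: ys by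
        simp [PySem.List.insertBy, hlt]]
      refine List.pairwise_cons.2 ⟨?_, h⟩
      intro z hz
      rcases List.mem_cons.1 hz with hz | hz
      · exact le_of_lt (hz ▸ hlt)
      · exact le_of_lt (lt_of_lt_of_le hlt (hy z hz))
    · rw [show PySem.List.insertBy (fun a b => decide (k a < k b)) x (y :: ys)
          = y :: PySem.List.insertBy (fun a b => decide (k a < k b)) x ys by
        simp [PySem.List.insertBy, hlt]]
      refine List.pairwise_cons.2 ⟨?_, ih ht⟩
      intro z hz
      rcases (PySem.List.mem_insertBy _ x z ys).1 hz with hz | hz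
      · exact hz ▸ not_lt.1 hlt
      · exact hy z hz

-- filtering commutes with a single insertion into a key-sorted list
theorem filter_insertBy {α κ : Type} [LinearOrder κ] (k : α → κ) (p : α → Bool) (x : α) (ys : List α)
    (h : ys.Pairwise (fun a b => k a ≤ k b)) :
    (PySem.List.insertBy (fun a b => decide (k a < k b)) x ys).filter p
      = if p x then PySem.List.insertBy (fun a b => decide (k a < k b)) x (ys.filter p)
        else ys.filter p := by
  induction ys with
  | nil =>
    by_cases hx : p x = true <;> simp [PySem.List.insertBy, hx]
  | cons y ys ih =>
    rcases List.pairwise_cons.1 h with ⟨hy, ht⟩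
    by_cases hlt : k x < k y
    · rw [show PySem.List.insertBy (fun a b => decide (k a < k b)) x (y :: ys) = x :: y :: ys by
        simp [PySem.List.insertBy, hlt]]
      by_cases hx : p x = true
      · rw [List.filter_cons_of_pos hx, if_pos hx]
        by_cases hpy : p y = true
        · rw [List.filter_cons_of_pos hpy]
          rw [show PySem.List.insertBy (fun a b => decide (k a < k b)) x (y :: ys.filter p)
              = x :: y :: ys.filter p by simp [PySem.List.insertBy, hlt]]
        · rw [List.filter_cons_of_neg hpy]
          rw [insertBy_eq_cons_of_forall]
          intro z hz
          have hz' := List.mem_of_mem_filter hz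
          exact decide_eq_true (lt_of_lt_of_le hlt (hy z hz'))
      · rw [List.filter_cons_of_neg hx, if_neg hx]
    · rw [show PySem.List.insertBy (fun a b => decide (k a < k b)) x (y :: ys)
          = y :: PySem.List.insertBy (fun a b => decide (k a < k b)) x ys by
        simp [PySem.List.insertBy, hlt]]
      by_cases hpy : p y = true
      · rw [List.filter_cons_of_pos hpy, List.filter_cons_of_pos hpy, ih ht]
        by_cases hx : p x = true
        · rw [if_pos hx, if_pos hx]
          rw [show PySem.List.insertBy (fun a b => decide (k a < k b)) x (y :: ys.filter p)
              = y :: PySem.List.insertBy (fun a b => decide (k a < k b)) x (ys.filter p) by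
            simp [PySem.List.insertBy, hlt]]
        · rw [if_neg hx, if_neg hx]
      · rw [List.filter_cons_of_neg hpy, List.filter_cons_of_neg hpy, ih ht]

-- filtering commutes with the insertion-sort fold
theorem filter_foldl_insertBy {α κ : Type} [LinearOrder κ] (k : α → κ) (p : α → Bool)
    (xs : List α) : ∀ (acc : List α), acc.Pairwise (fun a b => k a ≤ k b) →
    (xs.foldl (fun acc x => PySem.List.insertBy (fun a b => decide (k a < k b)) x acc) acc).filter p
      = (xs.filter p).foldl (fun acc x => PySem.List.insertBy (fun a b => decide (k a < k b)) x acc) (acc.filter p) := by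
  induction xs with
  | nil => intro acc _; rfl
  | cons x xs ih =>
    intro acc hacc
    have h1 := ih (PySem.List.insertBy (fun a b => decide (k a < k b)) x acc) (insertBy_pairwise k x acc hacc)
    rw [List.foldl_cons, h1, filter_insertBy k p x acc hacc, List.filter_cons]
    by_cases hx : p x = true
    · simp [hx]
    · simp [hx]

-- sorted() commutes with filter (stability of Python's sort under filtering)
theorem filter_sorted {α κ : Type} [LinearOrder κ] (k : α → κ) (p : α → Bool) (xs : List α) :
    (PySem.List.sorted xs k).filter p = PySem.List.sorted (xs.filter p) k := by
  rw [PySem.List.sorted_eq_foldl_insertBy, PySem.List.sorted_eq_foldl_insertBy]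
  simpa using filter_foldl_insertBy k p xs [] List.Pairwise.nil

-- sorting a secondary-key-sorted list by the primary key = sorting by the lexicographic pair
theorem foldl_insertBy_lex {α κ₀ κ₁ : Type} [LinearOrder κ₀] [LinearOrder κ₁]
    (k0 : α → κ₀) (k1 : α → κ₁) (xs : List α) :
    ∀ (acc : List α), xs.Pairwise (fun a b => k1 a ≤ k1 b) →
      (∀ y ∈ acc, ∀ x ∈ xs, k1 y ≤ k1 x) →
    xs.foldl (fun acc x => PySem.List.insertBy (fun a b => decide (k0 a < k0 b)) x acc) acc
      = xs.foldl (fun acc x => PySem.List.insertBy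
          (fun a b => decide (k0 a < k0 b) || (!decide (k0 b < k0 a) && decide (k1 a < k1 b))) x acc) acc := by
  induction xs with
  | nil => intro acc _ _; rfl
  | cons x xs ih =>
    intro acc hpw hacc
    rcases List.pairwise_cons.1 hpw with ⟨hx, ht⟩
    rw [List.foldl_cons, List.foldl_cons]
    have hcong : PySem.List.insertBy (fun a b => decide (k0 a < k0 b)) x acc
        = PySem.List.insertBy
            (fun a b => decide (k0 a < k0 b) || (!decide (k0 b < k0 a) && decide (k1 a < k1 b))) x acc := by
      apply insertBy_congr
      intro y hy
      have : ¬ k1 x < k1 y := not_lt.2 (hacc y hy x (by simp))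
      simp [this]
    rw [hcong]
    refine ih _ ht ?_
    intro y hy z hz
    rcases (PySem.List.mem_insertBy _ x y acc).1 hy with hy | hy
    · exact hy ▸ hx z hz
    · exact hacc y hy z (by simp [hz])

theorem sorted_eq_sorted2_of_pairwise {α κ₀ κ₁ : Type} [LinearOrder κ₀] [LinearOrder κ₁]
    (k0 : α → κ₀) (k1 : α → κ₁) (xs : List α)
    (h : xs.Pairwise (fun a b => k1 a ≤ k1 b)) :
    PySem.List.sorted xs k0 = PySem.List.sorted2 xs k0 k1 := by
  rw [PySem.List.sorted_eq_foldl_insertBy]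
  exact foldl_insertBy_lex k0 k1 xs [] h (by intro y hy; cases hy)

-- sorted2 is sorted with the lexicographic Lex-pair key
theorem sorted2_eq_sorted_lex {α κ₀ κ₁ : Type} [LinearOrder κ₀] [LinearOrder κ₁]
    (k0 : α → κ₀) (k1 : α → κ₁) (xs : List α) :
    PySem.List.sorted2 xs k0 k1
      = PySem.List.sorted xs (fun x => toLex (k0 x, k1 x)) := by
  rw [PySem.List.sorted_eq_foldl_insertBy]
  show xs.foldl (fun acc x => PySem.List.insertBy
      (fun a b => decide (k0 a < k0 b) || (!decide (k0 b < k0 a) && decide (k1 a < k1 b))) x acc) []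
    = _
  congr 1
  funext acc x
  congr 1
  funext a b
  have hiff : (toLex (k0 a, k1 a) < toLex (k0 b, k1 b))
      ↔ (k0 a < k0 b ∨ (¬ k0 b < k0 a ∧ k1 a < k1 b)) := by
    rw [Prod.Lex.toLex_lt_toLex]
    dsimp only
    constructor
    · rintro (h | ⟨h1, h2⟩)
      · exact Or.inl h
      · exact Or.inr ⟨by rw [h1]; exact lt_irrefl _, h2⟩
    · rintro (h | ⟨h1, h2⟩)
      · exact Or.inl h
      · by_cases hlt : k0 a < k0 b
        · exact Or.inl hlt
        · exact Or.inr ⟨le_antisymm (not_lt.1 h1) (not_lt.1 hlt), h2⟩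
  apply Bool.eq_iff_iff.2
  simp only [Bool.or_eq_true, Bool.and_eq_true, Bool.not_eq_true', decide_eq_true_eq,
    decide_eq_false_iff_not]
  exact hiff.symm

-- a key-sorted list with the same key-fibres as another key-sorted list is equal to it
theorem stable_unique {α κ : Type} [LinearOrder κ] (k : α → κ) :
    ∀ (u v : List α), u.Pairwise (fun a b => k a ≤ k b) → v.Pairwise (fun a b => k a ≤ k b) →
      (∀ c : κ, u.filter (fun x => decide (k x = c)) = v.filter (fun x => decide (k x = c))) →
      u = v := by
  intro u
  induction u with
  | nil =>
    intro v _ _ hf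
    cases v with
    | nil => rfl
    | cons b v' =>
      have := hf (k b)
      simp at this
  | cons a u' ih =>
    intro v hu hv hf
    cases v with
    | nil =>
      have := hf (k a)
      simp at this
    | cons b v' =>
      rcases List.pairwise_cons.1 hu with ⟨hau, hu'⟩
      rcases List.pairwise_cons.1 hv with ⟨hbv, hv'⟩
      have hab : k a = k b := by
        rcases lt_trichotomy (k a) (k b) with h | h | h
        · exfalso
          have hv0 : v'.filter (fun x => decide (k x = k a)) = [] :=
            List.filter_eq_nil_iff.2 (by
              intro z hz
              simp only [decide_eq_true_eq]
              exact (lt_of_lt_of_le h (hbv z hz)).ne')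
          have h1 := hf (k a)
          rw [List.filter_cons_of_pos (by simp), List.filter_cons_of_neg (by simp [h.ne']),
              hv0] at h1
          exact List.cons_ne_nil _ _ h1
        · exact h
        · exfalso
          have hu0 : u'.filter (fun x => decide (k x = k b)) = [] :=
            List.filter_eq_nil_iff.2 (by
              intro z hz
              simp only [decide_eq_true_eq]
              exact (lt_of_lt_of_le h (hau z hz)).ne')
          have h1 := hf (k b)
          rw [List.filter_cons_of_neg (by simp [h.ne']), List.filter_cons_of_pos (by simp),
              hu0] at h1
          exact List.cons_ne_nil _ _ h1.symm
      have hhead := hf (k a)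
      rw [List.filter_cons_of_pos (by simp), List.filter_cons_of_pos (by simp [hab])] at hhead
      have hab2 : a = b := (List.cons.injEq _ _ _ _ ▸ hhead).1
      have htails : u' = v' := by
        apply ih v' hu' hv'
        intro c
        by_cases hc : c = k a
        · subst hc
          exact (List.cons.injEq _ _ _ _ ▸ hhead).2
        · have := hf c
          rw [List.filter_cons_of_neg (by simp [Ne.symm hc]),
              List.filter_cons_of_neg (by simp [hab ▸ Ne.symm hc])] at this
          exact this
      rw [hab2, htails]

-- pre-sorting by a key the main key refines does not change the sort
theorem sorted_sorted_refine {α κ κ₁ : Type} [LinearOrder κ] [LinearOrder κ₁]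
    (K : α → κ) (k1 : α → κ₁) (hk : ∀ a b, K a = K b → k1 a = k1 b) (ys : List α) :
    PySem.List.sorted (PySem.List.sorted ys k1) K = PySem.List.sorted ys K := by
  apply stable_unique K _ _ (PySem.List.sorted_pairwise _ _) (PySem.List.sorted_pairwise _ _)
  intro c
  have hfib : ∀ (l : List α), (l.filter (fun x => decide (K x = c))).Pairwise (fun a b => k1 a ≤ k1 b) := by
    intro l
    apply List.pairwise_of_forall_mem_list
    intro a ha b hb
    have ha' : K a = c := of_decide_eq_true (List.mem_filter.1 ha).2
    have hb' : K b = c := of_decide_eq_true (List.mem_filter.1 hb).2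
    exact (hk a b (ha'.trans hb'.symm)).le
  have hfibK : ∀ (l : List α), (l.filter (fun x => decide (K x = c))).Pairwise (fun a b => K a ≤ K b) := by
    intro l
    apply List.pairwise_of_forall_mem_list
    intro a ha b hb
    have ha' : K a = c := of_decide_eq_true (List.mem_filter.1 ha).2
    have hb' : K b = c := of_decide_eq_true (List.mem_filter.1 hb).2
    exact (ha'.trans hb'.symm).le
  calc (PySem.List.sorted (PySem.List.sorted ys k1) K).filter (fun x => decide (K x = c))
      = PySem.List.sorted ((PySem.List.sorted ys k1).filter (fun x => decide (K x = c))) K :=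
        filter_sorted K _ _
    _ = PySem.List.sorted (PySem.List.sorted (ys.filter (fun x => decide (K x = c))) k1) K := by
        rw [filter_sorted]
    _ = PySem.List.sorted (ys.filter (fun x => decide (K x = c))) K := by
        rw [PySem.List.sorted_eq_self_of_pairwise _ _ (hfib ys)]
    _ = ys.filter (fun x => decide (K x = c)) :=
        PySem.List.sorted_eq_self_of_pairwise _ _ (hfibK ys)
    _ = (PySem.List.sorted ys K).filter (fun x => decide (K x = c)) := by
        rw [filter_sorted, PySem.List.sorted_eq_self_of_pairwise _ _ (hfibK ys)]

-- the for-loop over range(length) is first-index search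
theorem sortScheduleLoop_eq (sl : List (List String)) (d t : String) :
    ∀ (m j : Nat), sl.length - j ≤ m → j ≤ sl.length → ∀ (idx : Int),
    sortScheduleLoop sl d t (PySem.List.pyRange (j : Int) (sl.length : Int)) idx
      = (match (sl.drop j).findIdx?
            (fun x => decide (d ++ t < pvK1 x)) with
         | some n => ((j + n : Nat) : Int)
         | none => idx) := by
  intro m
  induction m with
  | zero =>
    intro j hm hj idx
    have hj' : j = sl.length := le_antisymm hj (by omega)
    subst hj'
    rw [List.drop_length]
    simp [PySem.List.pyRange, sortScheduleLoop]
  | succ m ih =>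
    intro j hm hj idx
    by_cases hlt : j < sl.length
    · rw [PySem.List.pyRange_one_cons (by exact_mod_cast hlt)]
      show sortScheduleLoop sl d t ((j : Int) :: PySem.List.pyRange ((j : Int) + 1) (sl.length : Int)) idx = _
      rw [List.drop_eq_getElem_cons hlt, List.findIdx?_cons]
      simp only [sortScheduleLoop]
      rw [show ((j : Int) + 1) = ((j + 1 : Nat) : Int) by push_cast; ring]
      have hget : PySem.List.pyGetD sl (j : Int) [] = sl[j] := by
        rw [PySem.List.pyGetD_natCast, List.getD_eq_getElem _ _ hlt]
      by_cases hc : d ++ t < pvK1 sl[j]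
      · rw [hget, show (PySem.List.pyGetD sl[j] 3 "" ++ PySem.List.pyGetD sl[j] 4 "") = pvK1 sl[j] from rfl,
            if_pos hc, if_pos (decide_eq_true hc)]
        simp
      · rw [hget, show (PySem.List.pyGetD sl[j] 3 "" ++ PySem.List.pyGetD sl[j] 4 "") = pvK1 sl[j] from rfl,
            if_neg hc, if_neg (by simpa using hc),
            ih (j + 1) (by omega) (by omega) idx]
        cases hfi : ((sl.drop (j + 1)).findIdx? (fun x => decide (d ++ t < pvK1 x))) with
        | none => simp
        | some n => simp; ring
    · have hj' : j = sl.length := by omega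
      subst hj'
      rw [List.drop_length]
      simp [PySem.List.pyRange, sortScheduleLoop]

-- in a key-sorted list, the suffix from the first index past the cutoff is the filter
theorem drop_findIdx_filter {α κ : Type} [LinearOrder κ] (k : α → κ) (c : κ) :
    ∀ (s : List α), s.Pairwise (fun a b => k a ≤ k b) → ∀ (n : Nat),
      s.findIdx? (fun x => decide (c < k x)) = some n →
      s.drop n = s.filter (fun x => decide (c < k x)) := by
  intro s
  induction s with
  | nil => intro _ n h; simp at h
  | cons x t ih =>
    intro hpw n h
    rcases List.pairwise_cons.1 hpw with ⟨hx, ht⟩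
    rw [List.findIdx?_cons] at h
    by_cases hc : c < k x
    · rw [if_pos (decide_eq_true hc)] at h
      have hn : n = 0 := by simpa using h.symm
      subst hn
      have hself : t.filter (fun x => decide (c < k x)) = t :=
        List.filter_eq_self.2 (by
          intro z hz
          exact decide_eq_true (lt_of_lt_of_le hc (hx z hz)))
      rw [List.drop_zero, List.filter_cons, if_pos (decide_eq_true hc), hself]
    · rw [if_neg (by simpa using hc)] at h
      rcases Option.map_eq_some_iff.1 h with ⟨m, hm, hnm⟩
      subst hnm
      rw [List.drop_succ_cons, List.filter_cons, if_neg (by simpa using hc)]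
      exact ih ht m hm

-- ===== VERDICT (by name: the statement is the Claim_ definition above) =====
theorem sort_schedule_spec : Claim_equal_sort_schedule := by
  intro schedule_list date_time _ _
  unfold Spec_sort_schedule sort_schedule sort_schedule_alt
  show (if sortScheduleLoop (PySem.List.sorted schedule_list pvK1) (pvDate date_time) (pvTime date_time)
          (PySem.List.pyRange 0 ((PySem.List.sorted schedule_list pvK1).length : Int)) (-1) = -1
        then []
        else PySem.List.sorted
          (PySem.List.slice (PySem.List.sorted schedule_list pvK1)
            (some (sortScheduleLoop (PySem.List.sorted schedule_list pvK1) (pvDate date_time) (pvTime date_time)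
              (PySem.List.pyRange 0 ((PySem.List.sorted schedule_list pvK1).length : Int)) (-1)))
            (some ((PySem.List.sorted schedule_list pvK1).length : Int))) pvK0)
      = PySem.List.sorted2
          (schedule_list.filter (fun x => decide (pvDate date_time ++ pvTime date_time < pvK1 x)))
          pvK0 pvK1
  generalize pvDate date_time = d
  generalize pvTime date_time = t
  set s := PySem.List.sorted schedule_list pvK1 with hs
  have hps : s.Pairwise (fun a b => pvK1 a ≤ pvK1 b) := PySem.List.sorted_pairwise _ _
  have hloop := sortScheduleLoop_eq s d t s.length 0 (by omega) (by omega) (-1)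
  rw [show ((0 : Nat) : Int) = (0 : Int) by simp] at hloop
  simp only [List.drop_zero, Nat.zero_add] at hloop
  cases hfi : s.findIdx? (fun x => decide (d ++ t < pvK1 x)) with
  | none =>
    rw [hloop, hfi, if_pos rfl]
    rw [List.filter_eq_nil_iff.2 (by
      intro a ha
      simpa using List.findIdx?_eq_none_iff.1 hfi a ((PySem.List.mem_sorted _ _ _ _).2 ha))]
    rfl
  | some n =>
    rw [hloop, hfi, if_neg (show ¬((n : Nat) : Int) = -1 by omega)]
    have hpair : (s.filter (fun x => decide (d ++ t < pvK1 x))).Pairwise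
        (fun a b => pvK1 a ≤ pvK1 b) :=
      List.Pairwise.sublist List.filter_sublist hps
    have hrefine : ∀ a b : List String,
        (fun x => toLex (pvK0 x, pvK1 x)) a = (fun x => toLex (pvK0 x, pvK1 x)) b →
        pvK1 a = pvK1 b := by
      intro a b hab
      have := congrArg (fun z => (ofLex z).2) hab
      simpa using this
    calc PySem.List.sorted (PySem.List.slice s (some (n : Int)) (some (s.length : Int))) pvK0
        = PySem.List.sorted (s.drop n) pvK0 := by
          rw [PySem.List.slice_natCast,
              List.take_of_length_le (by simp)]
      _ = PySem.List.sorted (s.filter (fun x => decide (d ++ t < pvK1 x))) pvK0 := by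
          rw [drop_findIdx_filter pvK1 (d ++ t) s hps n hfi]
      _ = PySem.List.sorted2 (s.filter (fun x => decide (d ++ t < pvK1 x))) pvK0 pvK1 :=
          sorted_eq_sorted2_of_pairwise pvK0 pvK1 _ hpair
      _ = PySem.List.sorted (s.filter (fun x => decide (d ++ t < pvK1 x)))
            (fun x => toLex (pvK0 x, pvK1 x)) :=
          sorted2_eq_sorted_lex pvK0 pvK1 _
      _ = PySem.List.sorted
            (PySem.List.sorted (schedule_list.filter (fun x => decide (d ++ t < pvK1 x))) pvK1)
            (fun x => toLex (pvK0 x, pvK1 x)) := by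
          rw [hs, filter_sorted]
      _ = PySem.List.sorted (schedule_list.filter (fun x => decide (d ++ t < pvK1 x)))
            (fun x => toLex (pvK0 x, pvK1 x)) :=
          sorted_sorted_refine _ pvK1 hrefine _
      _ = PySem.List.sorted2 (schedule_list.filter (fun x => decide (d ++ t < pvK1 x))) pvK0 pvK1 :=
          (sorted2_eq_sorted_lex pvK0 pvK1 _).symm
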